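-- pv_equiv track=rewrite | github.com/swaransheel/Bilingual-Hindi-English-toxicity-detection-system | censor_audi_simple.py | merge_spans_with_words
-- ===== SOURCE A (Python) =====
-- def merge_spans_with_words(spans):
--     """
--     Merge overlapping or back-to-back spans while preserving word and type info.
--     """
--     if not spans:
--         return []
--
--     # Sort by start time
--     spans = sorted(spans, key=lambda x: x[0])
--
--     merged = []
--     current_span = list(spans[0])
--     current_span[2] = [current_span[2]]  # Convert word to list
--     current_span[3] = [current_span[3]]  # Convert detection_types to list
--
--     for s, e, word, types in spans[1:]:
--         ps, pe, pwords, ptypes = current_span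
--
--         # If spans are close enough to merge (within 100ms)
--         if s <= pe + 100:
--             # Expand the end time if needed
--             current_span[1] = max(pe, e)
--             # Add word and types
--             current_span[2].append(word)
--             current_span[3].append(types)
--         else:
--             # Finalize the current span and start a new one
--             merged.append(tuple(current_span))
--             current_span = [s, e, [word], [types]]
--
--     # Add the final span
--     merged.append(tuple(current_span))
--     return merged
-- ===== SOURCE B (Python) =====
-- def merge_spans_with_words(spans):
--     """
--     Merge overlapping or nearby (gap <= 100ms) spans, preserving words/types.
--     Tag-then-group-then-reduce pipeline: pass 1 labels each sorted span with a
--     group id (a new id whenever a start exceeds the running max end + 100),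
--     pass 2 groups consecutive spans sharing an id, pass 3 reduces each group
--     to one merged tuple by aggregation.
--     """
--     ordered = sorted(spans, key=lambda x: x[0])
--     # Pass 1: assign a group id to each span
--     ids = []
--     gid, runmax = 0, None
--     for s, e, _w, _t in ordered:
--         if runmax is not None and s > runmax + 100:
--             gid, runmax = gid + 1, e
--         else:
--             runmax = e if runmax is None else max(runmax, e)
--         ids.append(gid)
--     # Pass 2: group consecutive spans that share an id
--     groups = []
--     for g, span in zip(ids, ordered):
--         if groups and groups[-1][0] == g:
--             groups[-1][1].append(span)
--         else:
--             groups.append((g, [span]))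
--     # Pass 3: reduce each group to one merged tuple
--     return [
--         (grp[0][0],
--          max(e for _s, e, _w, _t in grp),
--          [w for _s, _e, w, _t in grp],
--          [t for _s, _e, _w, t in grp])
--         for _g, grp in groups
--     ]
-- ===== Notes on version B (the rewrite author's own statement) =====
-- stated objective: alternative
-- what changed: Replaces A's single maintain-and-flush accumulator loop (mutable current span, flushed into 'merged' at each gap plus a final flush) with a staged tag-then-group-then-reduce pipeline: pass 1 labels each sorted span with a group id (new id when a start exceeds the running max end + 100), pass 2 groups consecutive spans sharing an id, pass 3 reduces each group to one merged tuple by aggregation (first start, max end, word/type lists).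
import Mathlib
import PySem

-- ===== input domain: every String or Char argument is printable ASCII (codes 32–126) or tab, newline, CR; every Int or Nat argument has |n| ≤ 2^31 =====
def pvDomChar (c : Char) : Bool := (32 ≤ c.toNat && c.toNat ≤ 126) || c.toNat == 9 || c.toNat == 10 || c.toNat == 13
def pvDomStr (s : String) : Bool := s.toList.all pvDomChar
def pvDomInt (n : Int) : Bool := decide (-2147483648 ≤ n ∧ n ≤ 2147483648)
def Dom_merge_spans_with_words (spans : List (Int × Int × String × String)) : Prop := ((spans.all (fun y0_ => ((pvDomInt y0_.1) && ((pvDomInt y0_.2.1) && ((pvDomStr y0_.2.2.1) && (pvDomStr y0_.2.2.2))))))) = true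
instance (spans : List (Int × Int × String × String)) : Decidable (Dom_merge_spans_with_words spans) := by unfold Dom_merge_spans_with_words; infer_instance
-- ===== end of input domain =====

-- B replaces A's single maintain-and-flush accumulator loop with a staged
-- tag-then-group-then-reduce pipeline (label pass, grouping pass, reduce pass); same cost.

-- ===== PORT A =====
-- A's for-loop body over spans[1:] with state (merged, current_span)
def stepA (acc : List (Int × Int × List String × List String) × (Int × Int × List String × List String))
    (x : Int × Int × String × String) :
    List (Int × Int × List String × List String) × (Int × Int × List String × List String) :=
  let (merged, cur) := acc
  let (s, e, word, types) := x
  let (ps, pe, pwords, ptypes) := cur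
  if s ≤ pe + 100 then (merged, (ps, max pe e, pwords ++ [word], ptypes ++ [types]))
  else (merged ++ [cur], (s, e, [word], [types]))

-- 'if not spans: return []' is folded into the [] case: sorted spans = [] iff spans = [].
def merge_spans_with_words (spans : List (Int × Int × String × String)) : List (Int × Int × List String × List String) :=
  match PySem.List.sorted spans (fun x => x.1) false with
  | [] => []
  | (s0, e0, w0, t0) :: rest =>
    let (merged, cur) := rest.foldl stepA ([], (s0, e0, [w0], [t0]))
    merged ++ [cur]

-- ===== PORT B =====
-- Pass 1 loop body: state is (ids, gid, runmax), runmax = None until the first span.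
def labelStep (acc : List Int × Int × Option Int) (x : Int × Int × String × String) :
    List Int × Int × Option Int :=
  let (ids, gid, runmax) := acc
  match runmax with
  | some r =>
      if x.1 > r + 100 then (ids ++ [gid + 1], gid + 1, some x.2.1)
      else (ids ++ [gid], gid, some (max r x.2.1))
  | none => (ids ++ [gid], gid, some x.2.1)

-- Pass 2 loop body: append to the last group when its id matches, else open a new group.
def groupStep (groups : List (Int × List (Int × Int × String × String)))
    (p : Int × (Int × Int × String × String)) :
    List (Int × List (Int × Int × String × String)) :=
  match groups.getLast? with
  | some last =>
      if last.1 == p.1 then groups.dropLast ++ [(last.1, last.2 ++ [p.2])]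
      else groups ++ [(p.1, [p.2])]
  | none => groups ++ [(p.1, [p.2])]

-- Pass 3: one merged tuple per group; Python's max(e for …) over the nonempty group
-- is the left fold of max started at the first end (the [] case is unreachable:
-- every group pass 2 builds is nonempty).
def aggregate (grp : List (Int × Int × String × String)) : Int × Int × List String × List String :=
  match grp with
  | [] => (0, 0, [], [])
  | (s0, e0, _, _) :: rest =>
    (s0, rest.foldl (fun m y => max m y.2.1) e0, grp.map (fun y => y.2.2.1), grp.map (fun y => y.2.2.2))

def merge_spans_with_words_alt (spans : List (Int × Int × String × String)) : List (Int × Int × List String × List String) :=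
  let ordered := PySem.List.sorted spans (fun x => x.1) false
  let ids := (ordered.foldl labelStep ([], 0, none)).1
  let groups := (ids.zip ordered).foldl groupStep []
  groups.map (fun gg => aggregate gg.2)

-- ===== PRECONDITION & SPEC =====
def Spec_merge_spans_with_words (spans : List (Int × Int × String × String)) (out : List (Int × Int × List String × List String)) : Prop := out = merge_spans_with_words_alt spans
instance (spans : List (Int × Int × String × String)) (out : List (Int × Int × List String × List String)) : Decidable (Spec_merge_spans_with_words spans out) := by unfold Spec_merge_spans_with_words; infer_instance

-- ===== CLAIM (what is proved, stated in full; the proofs are below) =====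
def Claim_equal_merge_spans_with_words : Prop := ∀ (spans : List (Int × Int × String × String)), Dom_merge_spans_with_words spans → Spec_merge_spans_with_words spans (merge_spans_with_words spans)

-- ===== LEMMAS AND PROOFS =====

-- Proof-side chunker: (consumed spans of the current group, final running max end, remainder).
def takeGroup (r : Int) : List (Int × Int × String × String) →
    List (Int × Int × String × String) × Int × List (Int × Int × String × String)
  | [] => ([], r, [])
  | x :: rest =>
    if x.1 ≤ r + 100 then
      let p := takeGroup (max r x.2.1) rest
      (x :: p.1, p.2)
    else ([], r, x :: rest)

theorem takeGroup_rest_length_le (r : Int) (l : List (Int × Int × String × String)) :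
    (takeGroup r l).2.2.length ≤ l.length := by
  induction l generalizing r with
  | nil => simp [takeGroup]
  | cons x rest ih =>
    simp only [takeGroup]
    split
    · exact le_trans (ih _) (Nat.le_succ _)
    · simp

-- Proof-side reference: one group per step of takeGroup.
def goB : List (Int × Int × String × String) → List (Int × Int × List String × List String)
  | [] => []
  | x :: rest =>
    let p := takeGroup x.2.1 rest
    (x.1, p.2.1, (x :: p.1).map (fun y => y.2.2.1), (x :: p.1).map (fun y => y.2.2.2)) :: goB p.2.2
termination_by l => l.length
decreasing_by
  exact Nat.lt_succ_of_le (takeGroup_rest_length_le _ _)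

-- takeGroup's final running max is the left max-fold over the consumed spans.
theorem takeGroup_end (r : Int) (l : List (Int × Int × String × String)) :
    (takeGroup r l).2.1 = (takeGroup r l).1.foldl (fun m y => max m y.2.1) r := by
  induction l generalizing r with
  | nil => simp [takeGroup]
  | cons x rest ih =>
    simp only [takeGroup]
    split
    · simpa using ih (max r x.2.1)
    · simp

-- A's fold equals the reference, group by group.
theorem foldA_eq_goB (rest : List (Int × Int × String × String))
    (m0 : List (Int × Int × List String × List String))
    (s pe : Int) (pw pt : List String) :
    (rest.foldl stepA (m0, (s, pe, pw, pt))).1 ++ [(rest.foldl stepA (m0, (s, pe, pw, pt))).2]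
      = m0 ++ (s, (takeGroup pe rest).2.1,
               pw ++ (takeGroup pe rest).1.map (fun y => y.2.2.1),
               pt ++ (takeGroup pe rest).1.map (fun y => y.2.2.2)) :: goB (takeGroup pe rest).2.2 := by
  induction rest generalizing m0 s pe pw pt with
  | nil => simp [takeGroup, goB]
  | cons x rest ih =>
    obtain ⟨s2, e2, w2, t2⟩ := x
    simp only [List.foldl_cons, stepA, takeGroup]
    by_cases h : s2 ≤ pe + 100
    · simp only [if_pos h]
      simpa [List.append_assoc] using ih m0 s (max pe e2) (pw ++ [w2]) (pt ++ [t2])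
    · simp only [if_neg (by omega : ¬ s2 ≤ pe + 100)]
      rw [ih (m0 ++ [(s, pe, pw, pt)]) s2 e2 [w2] [t2]]
      simp [goB, List.append_assoc]

-- Pass 1's fold, written recursively (from a non-None running max).
def labelsFrom (gid r : Int) : List (Int × Int × String × String) → List Int
  | [] => []
  | x :: rest =>
    if x.1 > r + 100 then (gid + 1) :: labelsFrom (gid + 1) x.2.1 rest
    else gid :: labelsFrom gid (max r x.2.1) rest

theorem foldl_labelStep (l : List (Int × Int × String × String)) (ids : List Int) (gid r : Int) :
    (l.foldl labelStep (ids, gid, some r)).1 = ids ++ labelsFrom gid r l := by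
  induction l generalizing ids gid r with
  | nil => simp [labelsFrom]
  | cons x rest ih =>
    simp only [List.foldl_cons, labelStep, labelsFrom]
    split
    · rw [ih]; simp
    · rw [ih]; simp

-- Pass 2 folded over the labelled spans, then reduced by pass 3, yields the reference
-- groups: the open last group absorbs the takeGroup-consumed prefix, the rest start fresh.
theorem fold_group_aggregate (l : List (Int × Int × String × String)) (gid r : Int)
    (groups : List (Int × List (Int × Int × String × String)))
    (grp : List (Int × Int × String × String)) :
    (((labelsFrom gid r l).zip l).foldl groupStep (groups ++ [(gid, grp)])).map (fun gg => aggregate gg.2)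
      = groups.map (fun gg => aggregate gg.2)
        ++ aggregate (grp ++ (takeGroup r l).1) :: goB (takeGroup r l).2.2 := by
  induction l generalizing gid r groups grp with
  | nil => simp [labelsFrom, takeGroup, goB]
  | cons x rest ih =>
    obtain ⟨s2, e2, w2, t2⟩ := x
    simp only [labelsFrom, takeGroup]
    by_cases h : s2 > r + 100
    · simp only [if_pos h, if_neg (by omega : ¬ s2 ≤ r + 100), List.zip_cons_cons, List.foldl_cons]
      have hstep : groupStep (groups ++ [(gid, grp)]) (gid + 1, (s2, e2, w2, t2))
          = (groups ++ [(gid, grp)]) ++ [(gid + 1, [(s2, e2, w2, t2)])] := by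
        have hne : (gid == gid + 1) = false := by rw [beq_eq_false_iff_ne]; omega
        simp [groupStep, List.getLast?_append, hne]
      rw [hstep, ih (gid + 1) e2 (groups ++ [(gid, grp)]) [(s2, e2, w2, t2)]]
      simp [goB, aggregate, takeGroup_end]
    · simp only [if_neg h, if_pos (by omega : s2 ≤ r + 100), List.zip_cons_cons, List.foldl_cons]
      have hstep : groupStep (groups ++ [(gid, grp)]) (gid, (s2, e2, w2, t2))
          = groups ++ [(gid, grp ++ [(s2, e2, w2, t2)])] := by
        simp [groupStep, List.getLast?_append]
      rw [hstep, ih gid (max r e2) groups (grp ++ [(s2, e2, w2, t2)])]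
      simp [List.append_assoc]

-- ===== VERDICT (by name: the statement is the Claim_ definition above) =====
theorem merge_spans_with_words_spec : Claim_equal_merge_spans_with_words := by
  intro spans _
  unfold Spec_merge_spans_with_words merge_spans_with_words merge_spans_with_words_alt
  cases h : PySem.List.sorted spans (fun x => x.1) false with
  | nil => simp
  | cons x rest =>
    obtain ⟨s0, e0, w0, t0⟩ := x
    simp only [List.foldl_cons]
    have hids : (rest.foldl labelStep (labelStep ([], 0, none) (s0, e0, w0, t0))).1
        = 0 :: labelsFrom 0 e0 rest := by
      simp only [labelStep]
      simpa using foldl_labelStep rest [(0 : Int)] 0 e0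
    rw [hids]
    simp only [List.zip_cons_cons, List.foldl_cons]
    have hstep0 : groupStep [] ((0 : Int), (s0, e0, w0, t0)) = [((0 : Int), [(s0, e0, w0, t0)])] := by
      simp [groupStep]
    rw [hstep0]
    have hB := fold_group_aggregate rest 0 e0 [] [(s0, e0, w0, t0)]
    simp only [List.nil_append, List.map_nil] at hB
    rw [hB]
    rw [foldA_eq_goB rest [] s0 e0 [w0] [t0]]
    simp [aggregate, takeGroup_end]
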